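-- pv_equiv track=rewrite | github.com/hvvany/TIL | Algorithm/OCT/week_3/오픈채팅방.py | solution
-- ===== SOURCE A (Python) =====
-- def solution(record):
--     answer = []
--     name_dic = dict()
--     for name in record:
--         information = list(name.split())
--         if information[0] == 'Enter' or information[0] == 'Change':
--             name_dic[information[1]] = information[2]
--     for status in record:
--         enter_leave = list(status.split())
--         if enter_leave[0] == 'Enter':
--             answer.append(name_dic[enter_leave[1]] + '님이 들어왔습니다.')
--         elif enter_leave[0] == 'Leave':
--             answer.append(name_dic[enter_leave[1]] + '님이 나갔습니다.')
--     return answer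
-- ===== SOURCE B (Python) =====
-- def solution(record):
--     # One pass: build the name table and an (entered?, id) event list together;
--     # then emit messages from the event table (no re-split of record).
--     name_dic = {}
--     events = []
--     for line in record:
--         parts = line.split()
--         action = parts[0]
--         if action == 'Enter' or action == 'Change':
--             name_dic[parts[1]] = parts[2]
--         if action == 'Enter':
--             events.append((True, parts[1]))
--         elif action == 'Leave':
--             events.append((False, parts[1]))
--     return [name_dic[uid] + ('님이 들어왔습니다.' if entered else '님이 나갔습니다.')
--             for (entered, uid) in events]
-- ===== Notes on version B (the rewrite author's own statement) =====
-- stated objective: faster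
-- what changed: B parses each record line once in a single pass that builds both the name table and an (entered, id) event list, then emits the messages from the event table, instead of A's two full scans each re-splitting every line.
import Mathlib
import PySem

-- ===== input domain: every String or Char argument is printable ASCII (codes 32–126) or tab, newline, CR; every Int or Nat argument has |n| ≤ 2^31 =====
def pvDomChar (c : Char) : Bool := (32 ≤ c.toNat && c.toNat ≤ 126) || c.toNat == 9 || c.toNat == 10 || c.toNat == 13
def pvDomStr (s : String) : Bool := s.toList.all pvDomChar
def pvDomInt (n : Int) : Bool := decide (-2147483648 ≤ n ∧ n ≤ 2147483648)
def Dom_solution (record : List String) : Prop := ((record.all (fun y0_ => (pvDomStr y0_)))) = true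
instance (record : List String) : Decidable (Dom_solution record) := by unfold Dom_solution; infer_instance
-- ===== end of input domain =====

-- B parses each line once, building the name table and an (entered, id) event list in one
-- pass, then emits messages from the event table (faster by a constant factor: no second re-split of record).

-- ===== PORT A =====
-- first loop body: update name_dic on Enter/Change
def aDictStep (d : PySem.Dict String String) (name : String) : PySem.Dict String String :=
  let information := PySem.Str.split₀ name
  if (PySem.List.pyGet? information 0).getD "" = "Enter" ∨ (PySem.List.pyGet? information 0).getD "" = "Change" then
    d.insert ((PySem.List.pyGet? information 1).getD "") ((PySem.List.pyGet? information 2).getD "")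
  else d

-- second loop body: append the message (dict lookup / index errors excluded by Pre_)
def aAnsStep (nameDic : PySem.Dict String String) (answer : List String) (status : String) : List String :=
  let el := PySem.Str.split₀ status
  if (PySem.List.pyGet? el 0).getD "" = "Enter" then
    answer ++ [(nameDic.getD ((PySem.List.pyGet? el 1).getD "") "") ++ "님이 들어왔습니다."]
  else if (PySem.List.pyGet? el 0).getD "" = "Leave" then
    answer ++ [(nameDic.getD ((PySem.List.pyGet? el 1).getD "") "") ++ "님이 나갔습니다."]
  else answer

def solution (record : List String) : List String :=
  let nameDic := record.foldl aDictStep PySem.Dict.empty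
  record.foldl (aAnsStep nameDic) []

-- ===== PORT B =====
-- single-pass body: update the table and append an (entered?, id) event
def bStep (st : PySem.Dict String String × List (Bool × String)) (line : String)
    : PySem.Dict String String × List (Bool × String) :=
  let parts := PySem.Str.split₀ line
  let action := (PySem.List.pyGet? parts 0).getD ""
  let d := if action = "Enter" ∨ action = "Change" then
             st.1.insert ((PySem.List.pyGet? parts 1).getD "") ((PySem.List.pyGet? parts 2).getD "")
           else st.1
  let evts := if action = "Enter" then st.2 ++ [(true, (PySem.List.pyGet? parts 1).getD "")]
              else if action = "Leave" then st.2 ++ [(false, (PySem.List.pyGet? parts 1).getD "")]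
              else st.2
  (d, evts)

def bEmit (nameDic : PySem.Dict String String) (ev : Bool × String) : String :=
  nameDic.getD ev.2 "" ++ (if ev.1 then "님이 들어왔습니다." else "님이 나갔습니다.")

def solution_alt (record : List String) : List String :=
  let st := record.foldl bStep (PySem.Dict.empty, [])
  st.2.map (bEmit st.1)

-- ===== PRECONDITION & SPEC =====
-- Pre_ excludes exactly the inputs where Python A raises: a line with no tokens
-- (IndexError), an Enter/Change line with fewer than 3 tokens (IndexError), a Leave line
-- with fewer than 2 tokens (IndexError) or whose id never occurs in an Enter/Change line
-- (KeyError).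
def Pre_solution (record : List String) : Prop :=
  ∀ line ∈ record,
    (PySem.Str.split₀ line) ≠ [] ∧
    (((PySem.Str.split₀ line).headD "" = "Enter" ∨ (PySem.Str.split₀ line).headD "" = "Change") →
      3 ≤ (PySem.Str.split₀ line).length) ∧
    ((PySem.Str.split₀ line).headD "" = "Leave" →
      2 ≤ (PySem.Str.split₀ line).length ∧
      ∃ l ∈ record, ((PySem.Str.split₀ l).headD "" = "Enter" ∨ (PySem.Str.split₀ l).headD "" = "Change") ∧
        (PySem.List.pyGet? (PySem.Str.split₀ l) 1) = (PySem.List.pyGet? (PySem.Str.split₀ line) 1))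
instance (record : List String) : Decidable (Pre_solution record) := by
  unfold Pre_solution; infer_instance

def pvWitness_solution : List String := ["Enter u1 Ann", "Leave u1", "Change u1 Bob"]

def Spec_solution (record : List String) (out : List String) : Prop := out = solution_alt record
instance (record : List String) (out : List String) : Decidable (Spec_solution record out) := by unfold Spec_solution; infer_instance

-- ===== CLAIM (what is proved, stated in full; the proofs are below) =====
def Claim_equal_solution : Prop := ∀ (record : List String), Dom_solution record → Pre_solution record → Spec_solution record (solution record)

-- ===== LEMMAS AND PROOFS =====

-- the event a line contributes (Enter/Leave), as seen by both programs
def evOf (line : String) : Option (Bool × String) :=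
  let parts := PySem.Str.split₀ line
  if (PySem.List.pyGet? parts 0).getD "" = "Enter" then some (true, (PySem.List.pyGet? parts 1).getD "")
  else if (PySem.List.pyGet? parts 0).getD "" = "Leave" then some (false, (PySem.List.pyGet? parts 1).getD "")
  else none

theorem bStep_fold (rec : List String) (d : PySem.Dict String String) (evts : List (Bool × String)) :
    rec.foldl bStep (d, evts) = (rec.foldl aDictStep d, evts ++ rec.filterMap evOf) := by
  induction rec generalizing d evts with
  | nil => simp
  | cons line rest ih =>
    simp only [List.foldl_cons, List.filterMap_cons]
    rw [ih]
    unfold bStep aDictStep evOf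
    by_cases h1 : (PySem.List.pyGet? (PySem.Str.split₀ line) 0).getD "" = "Enter" <;>
      by_cases h2 : (PySem.List.pyGet? (PySem.Str.split₀ line) 0).getD "" = "Change" <;>
        by_cases h3 : (PySem.List.pyGet? (PySem.Str.split₀ line) 0).getD "" = "Leave" <;>
          simp [h1, h2, h3]

theorem aAns_fold (D : PySem.Dict String String) (rec : List String) (acc : List String) :
    rec.foldl (aAnsStep D) acc = acc ++ (rec.filterMap evOf).map (bEmit D) := by
  induction rec generalizing acc with
  | nil => simp
  | cons line rest ih =>
    simp only [List.foldl_cons, List.filterMap_cons]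
    rw [ih]
    unfold aAnsStep evOf bEmit
    by_cases h1 : (PySem.List.pyGet? (PySem.Str.split₀ line) 0).getD "" = "Enter" <;>
      by_cases h3 : (PySem.List.pyGet? (PySem.Str.split₀ line) 0).getD "" = "Leave" <;>
        simp [h1, h3]

-- ===== VERDICT (by name: the statement is the Claim_ definition above) =====
theorem solution_spec : Claim_equal_solution := by
  intro record _ _
  unfold Spec_solution solution solution_alt
  rw [bStep_fold, aAns_fold]
  simp
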